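-- pv_equiv track=rewrite | github.com/dambar11803/EccBatchV2.0 | ecc_batch/views.py | _extract_reason_from_parts
-- ===== SOURCE A (Python) =====
-- def _extract_reason_from_parts(parts):
--     reason_keywords = [
--         'INSUFFICIENT', 'SIGNATURE', 'ACCOUNT', 'CLOSED', 'STOP',
--         'PAYMENT', 'DRAWER', 'IRREGUL', 'FUNDS', 'REFER', 'EXCEEDS',
--         'AMOUNT', 'WORDS', 'FIGURES', 'DIFFER', 'POST', 'DATED',
--         'STALE', 'MUTILATED', 'CLEARING', 'ENDORSEMENT', 'ACCEPTED',
--     ]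
--
--     reason_parts = []
--     found_amount = False
--
--     for p in reversed(parts):
--         pu = p.upper()
--
--         if ',' in p and any(c.isdigit() for c in p):
--             found_amount = True
--             break
--
--         if any(k in pu for k in reason_keywords):
--             reason_parts.insert(0, p)
--         elif found_amount or len(p) < 3:
--             continue
--         elif (not p.isdigit()) and p.isalpha() and pu not in ['CLG', 'BANK', 'BFD', 'PAY']:
--             reason_parts.insert(0, p)
--
--     return ' '.join(reason_parts) if reason_parts else None
-- ===== SOURCE B (Python) =====
-- def _extract_reason_from_parts(parts):
--     reason_keywords = [
--         'INSUFFICIENT', 'SIGNATURE', 'ACCOUNT', 'CLOSED', 'STOP',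
--         'PAYMENT', 'DRAWER', 'IRREGUL', 'FUNDS', 'REFER', 'EXCEEDS',
--         'AMOUNT', 'WORDS', 'FIGURES', 'DIFFER', 'POST', 'DATED',
--         'STALE', 'MUTILATED', 'CLEARING', 'ENDORSEMENT', 'ACCEPTED',
--     ]
--
--     # Phase 1: boundary = index just after the last amount-like token.
--     start = 0
--     for i, p in enumerate(parts):
--         if ',' in p and any(c.isdigit() for c in p):
--             start = i + 1
--
--     # Phase 2: forward filter over the tokens after the boundary.
--     picked = []
--     for p in parts[start:]:
--         pu = p.upper()
--         if any(k in pu for k in reason_keywords) or (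
--             len(p) >= 3 and not p.isdigit() and p.isalpha()
--             and pu not in ['CLG', 'BANK', 'BFD', 'PAY']
--         ):
--             picked.append(p)
--
--     return ' '.join(picked) if picked else None
-- ===== Notes on version B (the rewrite author's own statement) =====
-- stated objective: simpler
-- what changed: A scans the list in reverse with a break flag and insert(0, ...) into the growing result; B first finds the boundary (index after the last amount-like token) in one forward enumerate pass, then forward-filters the suffix with append, removing the quadratic insert(0, ...)s.
import Mathlib
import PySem

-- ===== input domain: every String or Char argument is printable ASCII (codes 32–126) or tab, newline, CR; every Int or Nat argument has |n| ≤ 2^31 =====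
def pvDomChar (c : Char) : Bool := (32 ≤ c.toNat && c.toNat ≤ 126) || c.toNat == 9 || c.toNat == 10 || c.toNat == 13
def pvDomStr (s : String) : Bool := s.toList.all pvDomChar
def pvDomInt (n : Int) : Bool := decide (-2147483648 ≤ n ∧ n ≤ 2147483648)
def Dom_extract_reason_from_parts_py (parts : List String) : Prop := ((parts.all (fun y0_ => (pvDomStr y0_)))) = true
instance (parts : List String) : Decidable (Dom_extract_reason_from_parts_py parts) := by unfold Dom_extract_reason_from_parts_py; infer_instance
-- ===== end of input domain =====

-- B replaces A's reverse scan with break + insert(0, …) by two forward phases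
-- (find the boundary after the last amount-like token, then filter the suffix);
-- objective: simpler. Same return value on every input (A is total).

-- shared token tests (identical expressions in both Python sources)
def pvKeywords : List String :=
  ["INSUFFICIENT", "SIGNATURE", "ACCOUNT", "CLOSED", "STOP",
   "PAYMENT", "DRAWER", "IRREGUL", "FUNDS", "REFER", "EXCEEDS",
   "AMOUNT", "WORDS", "FIGURES", "DIFFER", "POST", "DATED",
   "STALE", "MUTILATED", "CLEARING", "ENDORSEMENT", "ACCEPTED"]

-- ',' in p and any(c.isdigit() for c in p)   (char iteration via toList, exact)
def pvAmount (p : String) : Bool :=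
  PySem.Str.isIn "," p && p.toList.any PySem.Chars.isdigit

-- any(k in pu for k in reason_keywords)
def pvKwHit (pu : String) : Bool := pvKeywords.any (fun k => PySem.Str.isIn k pu)

-- ===== PORT A =====
-- the 'for p in reversed(parts)' loop: state = (reason_parts, found_amount); break returns acc
def pvLoopA : List String → List String → Bool → List String
  | [], acc, _ => acc
  | p :: rest, acc, found =>
    let pu := PySem.Str.upper p
    if pvAmount p then acc  -- found_amount = True; break
    else if pvKwHit pu then pvLoopA rest (p :: acc) found  -- reason_parts.insert(0, p)
    else if found || decide (PySem.Str.len p < 3) then pvLoopA rest acc found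
    else if (!PySem.Str.strIsdigit p && PySem.Str.strIsalpha p)
            && !(["CLG", "BANK", "BFD", "PAY"].contains pu) then
      pvLoopA rest (p :: acc) found
    else pvLoopA rest acc found

def extract_reason_from_parts_py (parts : List String) : Option String :=
  let reason_parts := pvLoopA parts.reverse [] false
  if reason_parts.isEmpty then none else some (PySem.Str.join " " reason_parts)

-- ===== PORT B =====
-- phase-2 test: keyword hit, or a plain word of length ≥ 3 outside the stop list
def pvKeepB (p : String) : Bool :=
  let pu := PySem.Str.upper p
  pvKwHit pu ||
    (decide (3 ≤ PySem.Str.len p) &&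
      ((!PySem.Str.strIsdigit p && PySem.Str.strIsalpha p)
        && !(["CLG", "BANK", "BFD", "PAY"].contains pu)))

def extract_reason_from_parts_py_alt (parts : List String) : Option String :=
  -- phase 1: start = index just after the last amount-like token
  let start : Int :=
    (PySem.List.enumerate parts).foldl
      (fun s ip => if pvAmount ip.2 then ip.1 + 1 else s) 0
  -- phase 2: filter parts[start:]
  let picked := (PySem.List.slice parts (some start) none).filter pvKeepB
  if picked.isEmpty then none else some (PySem.Str.join " " picked)

-- ===== PRECONDITION & SPEC =====
def Spec_extract_reason_from_parts_py (parts : List String) (out : Option String) : Prop := out = extract_reason_from_parts_py_alt parts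
instance (parts : List String) (out : Option String) : Decidable (Spec_extract_reason_from_parts_py parts out) := by unfold Spec_extract_reason_from_parts_py; infer_instance

-- ===== CLAIM (what is proved, stated in full; the proofs are below) =====
def Claim_equal_extract_reason_from_parts_py : Prop := ∀ (parts : List String), Dom_extract_reason_from_parts_py parts → Spec_extract_reason_from_parts_py parts (extract_reason_from_parts_py parts)

-- ===== LEMMAS AND PROOFS =====

-- the boundary fold, named for the proofs
def pvStart (parts : List String) : Int :=
  (PySem.List.enumerate parts).foldl
    (fun s ip => if pvAmount ip.2 then ip.1 + 1 else s) 0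

theorem pvEnumerate_append_singleton (xs : List String) (x : String) (s : Int) :
    PySem.List.enumerate (xs ++ [x]) s
      = PySem.List.enumerate xs s ++ [(s + xs.length, x)] := by
  induction xs generalizing s with
  | nil => simp [PySem.List.enumerate_nil, PySem.List.enumerate_cons]
  | cons y ys ih =>
    simp only [List.cons_append, PySem.List.enumerate_cons, ih, List.length_cons]
    push_cast
    ring_nf

theorem pvStart_append_singleton (xs : List String) (x : String) :
    pvStart (xs ++ [x]) = if pvAmount x then (xs.length : Int) + 1 else pvStart xs := by
  unfold pvStart
  rw [pvEnumerate_append_singleton, List.foldl_append]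
  simp

theorem pvStart_spec (xs : List String) :
    0 ≤ pvStart xs ∧ (pvStart xs).toNat ≤ xs.length ∧
      xs.drop (pvStart xs).toNat
        = (xs.reverse.takeWhile (fun p => !pvAmount p)).reverse := by
  induction xs using List.reverseRecOn with
  | nil => simp [pvStart, PySem.List.enumerate_nil]
  | append_singleton xs x ih =>
    obtain ⟨h0, hle, hdrop⟩ := ih
    rw [pvStart_append_singleton]
    by_cases hx : pvAmount x = true
    · rw [if_pos hx]
      refine ⟨by positivity, by simp, ?_⟩
      have ht : ((xs ++ [x]).reverse.takeWhile (fun p => !pvAmount p)) = [] := by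
        simp [List.reverse_append, hx]
      rw [ht]
      simp
    · rw [if_neg hx]
      have hxb : pvAmount x = false := by simpa using hx
      refine ⟨h0, by simp; omega, ?_⟩
      rw [show (xs ++ [x]).reverse = x :: xs.reverse by simp]
      rw [List.takeWhile_cons_of_pos (by simp [hxb])]
      rw [List.reverse_cons, ← hdrop, List.drop_append_of_le_length hle]

theorem pvLoopA_cons (p : String) (rest acc : List String) (hA : pvAmount p = false) :
    pvLoopA (p :: rest) acc false
      = pvLoopA rest (if pvKeepB p then p :: acc else acc) false := by
  simp only [pvLoopA]
  rw [if_neg (show ¬ pvAmount p = true by simp [hA])]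
  by_cases hK : pvKwHit (PySem.Str.upper p) = true
  · rw [if_pos hK, if_pos (show pvKeepB p = true by simp only [pvKeepB]; rw [hK]; rfl)]
  · have hKb : pvKwHit (PySem.Str.upper p) = false := by simpa using hK
    rw [if_neg hK]
    by_cases h2 : PySem.Str.len p < 3
    · have hd : decide (3 ≤ PySem.Str.len p) = false := decide_eq_false (not_le.mpr h2)
      have hkeep : pvKeepB p = false := by
        simp only [pvKeepB]; rw [hKb, hd]; simp
      rw [if_pos (show (false || decide (PySem.Str.len p < 3)) = true by simp only [Bool.false_or, decide_eq_true_eq]; exact h2),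
        if_neg (show ¬ pvKeepB p = true by simp [hkeep])]
    · have hd : decide (3 ≤ PySem.Str.len p) = true := decide_eq_true (not_lt.mp h2)
      rw [if_neg (show ¬ (false || decide (PySem.Str.len p < 3)) = true by simp only [Bool.false_or, decide_eq_true_eq]; exact h2)]
      by_cases h3 : ((!PySem.Str.strIsdigit p && PySem.Str.strIsalpha p)
          && !(["CLG", "BANK", "BFD", "PAY"].contains (PySem.Str.upper p))) = true
      · rw [if_pos h3,
          if_pos (show pvKeepB p = true by simp only [pvKeepB]; rw [hKb, hd, h3]; rfl)]
      · have h3b : ((!PySem.Str.strIsdigit p && PySem.Str.strIsalpha p)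
            && !(["CLG", "BANK", "BFD", "PAY"].contains (PySem.Str.upper p))) = false := by
          simpa using h3
        rw [if_neg h3,
          if_neg (show ¬ pvKeepB p = true by simp only [pvKeepB]; rw [hKb, hd, h3b]; simp)]

theorem pvLoopA_eq (l : List String) :
    ∀ acc, pvLoopA l acc false
      = ((l.takeWhile (fun p => !pvAmount p)).filter pvKeepB).reverse ++ acc := by
  induction l with
  | nil => intro acc; simp [pvLoopA]
  | cons p rest ih =>
    intro acc
    by_cases hA : pvAmount p = true
    · rw [List.takeWhile_cons_of_neg (by simp [hA])]
      simp [pvLoopA, hA]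
    · have hAb : pvAmount p = false := by simpa using hA
      rw [pvLoopA_cons p rest acc hAb, List.takeWhile_cons_of_pos (by simp [hAb]),
        List.filter_cons]
      by_cases hk : pvKeepB p = true <;> simp [hk, ih]

-- ===== VERDICT (by name: the statement is the Claim_ definition above) =====
theorem extract_reason_from_parts_py_spec : Claim_equal_extract_reason_from_parts_py := by
  intro parts _
  obtain ⟨h0, _, hdrop⟩ := pvStart_spec parts
  have hML : pvLoopA parts.reverse [] false
      = (PySem.List.slice parts (some (pvStart parts)) none).filter pvKeepB := by
    rw [PySem.List.slice_from _ h0, hdrop, pvLoopA_eq, List.append_nil]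
    rw [← List.filter_reverse]
  show (let reason_parts := pvLoopA parts.reverse [] false;
      if reason_parts.isEmpty then none else some (PySem.Str.join " " reason_parts))
    = extract_reason_from_parts_py_alt parts
  rw [show extract_reason_from_parts_py_alt parts
      = (let picked := (PySem.List.slice parts (some (pvStart parts)) none).filter pvKeepB;
         if picked.isEmpty then none else some (PySem.Str.join " " picked)) from rfl]
  rw [hML]
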